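-- pv_equiv track=rewrite | github.com/MrDPrasad/py-help | name.py | calculate_string_value
-- ===== SOURCE A (Python) =====
-- def calculate_string_value(input_string):
--     # Define a dictionary to map each letter to its corresponding value
--     letter_values = {'a': 1, 'b': 2, 'c': 3, 'd': 4, 'e': 5, 'f': 6, 'g': 7, 'h': 8, 'i': 9,
--                      'j': 10, 'k': 11, 'l': 12, 'm': 13, 'n': 14, 'o': 15, 'p': 16, 'q': 17,
--                      'r': 18, 's': 19, 't': 20, 'u': 21, 'v': 22, 'w': 23, 'x': 24, 'y': 25, 'z': 26}
--
--     # Remove spaces from the input string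
--     input_string = input_string.replace(" ", "")
--
--     # Convert the input string to lowercase for case-insensitivity
--     input_string = input_string.lower()
--
--     # Calculate the total value by summing up the values for each character
--     total_value = sum(letter_values.get(char, 0) for char in input_string)
--
--     # Continue adding individual digits until a single-digit result is obtained
--     while total_value >= 10:
--         total_value = sum(map(int, str(total_value)))
--
--     # Display individual values for each character
--     char_values = {char: letter_values.get(char, 0) for char in input_string}
--
--     return total_value, char_values
-- ===== SOURCE B (Python) =====
-- def calculate_string_value(input_string):
--     # One pass over the cleaned string: accumulate total and per-char values together,
--     # letter value via ord arithmetic; digital root by closed form instead of a loop.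
--     s = input_string.replace(" ", "").lower()
--     total = 0
--     char_values = {}
--     for ch in s:
--         v = ord(ch) - 96 if 'a' <= ch <= 'z' else 0
--         total += v
--         char_values[ch] = v
--     total = 0 if total == 0 else (total - 1) % 9 + 1
--     return total, char_values
-- ===== Notes on version B (the rewrite author's own statement) =====
-- stated objective: simpler
-- what changed: Replaces the repeated digit-sum while-loop with the closed-form digital root ((total-1)%9+1, 0 for 0), fuses the separate sum pass and dict-comprehension pass into a single loop, and computes letter values by ord arithmetic instead of a 26-entry lookup table.
import Mathlib
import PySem

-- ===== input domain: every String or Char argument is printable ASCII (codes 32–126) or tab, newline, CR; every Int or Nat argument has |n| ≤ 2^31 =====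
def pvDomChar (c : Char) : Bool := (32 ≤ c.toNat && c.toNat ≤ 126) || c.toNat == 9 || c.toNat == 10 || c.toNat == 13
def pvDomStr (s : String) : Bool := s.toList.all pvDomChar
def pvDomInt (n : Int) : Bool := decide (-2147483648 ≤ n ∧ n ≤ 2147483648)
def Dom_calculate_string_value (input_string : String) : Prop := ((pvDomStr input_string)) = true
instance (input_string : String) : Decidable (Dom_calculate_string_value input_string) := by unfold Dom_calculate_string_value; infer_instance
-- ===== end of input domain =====

-- B replaces A's digit-sum while-loop by the closed-form digital root and fuses A's two
-- passes (sum + dict comprehension) into one loop computing letter values arithmetically.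

-- ===== PORT A =====
-- A's letter_values dict literal
def pvLetterValues : PySem.Dict Char Int := PySem.Dict.ofList
  [('a',1),('b',2),('c',3),('d',4),('e',5),('f',6),('g',7),('h',8),('i',9),
   ('j',10),('k',11),('l',12),('m',13),('n',14),('o',15),('p',16),('q',17),
   ('r',18),('s',19),('t',20),('u',21),('v',22),('w',23),('x',24),('y',25),('z',26)]

-- sum(map(int, str(total_value))); exact on the reachable inputs (total_value ≥ 10, so
-- str gives decimal digits only and int() never raises — getD 0 is never taken)
def pvDigitSumA (n : Int) : Int :=
  ((PySem.Int.toChars n).map (fun c => (PySem.Int.ofChars? [c]).getD 0)).sum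

-- termination facts for A's while-loop, used by pvRootLoopA's decreasing_by
lemma pv_toDigitsCore_eq : ∀ (fuel n : Nat) (acc : List Char), 0 < n → n < fuel →
    Nat.toDigitsCore 10 fuel n acc = ((Nat.digits 10 n).map Nat.digitChar).reverse ++ acc := by
  intro fuel
  induction fuel with
  | zero => intro n acc h hf; omega
  | succ f ih =>
    intro n acc hpos hf
    rw [Nat.toDigitsCore, Nat.digits_def' (by norm_num) hpos]
    by_cases h10 : n / 10 = 0
    · simp [h10]
    · have hlt : n / 10 < f := lt_of_lt_of_le (Nat.div_lt_self hpos (by norm_num)) (by omega)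
      simp only [h10, if_false]
      rw [ih (n / 10) _ (Nat.pos_of_ne_zero h10) hlt]
      simp

lemma pv_int_digitChar (d : Nat) (h : d < 10) :
    (PySem.Int.ofChars? [Nat.digitChar d]).getD 0 = (d : Int) := by
  interval_cases d <;> decide

lemma pvDigitSumA_eq (n : Nat) (h : 0 < n) :
    pvDigitSumA (n : Int) = ((Nat.digits 10 n).sum : Int) := by
  unfold pvDigitSumA
  have htc : PySem.Int.toChars (n : Int) = ((Nat.digits 10 n).map Nat.digitChar).reverse := by
    unfold PySem.Int.toChars
    rw [if_neg (by omega)]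
    simp only [Int.toNat_natCast]
    unfold Nat.toDigits
    rw [pv_toDigitsCore_eq (n + 1) n [] h (by omega)]
    simp
  rw [htc, List.map_reverse, List.sum_reverse, List.map_map]
  rw [List.map_congr_left (fun d hd => by
    exact pv_int_digitChar d (Nat.digits_lt_base (by norm_num) hd))]
  exact (Nat.cast_list_sum _).symm

lemma pv_digits_sum_le (n : Nat) : (Nat.digits 10 n).sum ≤ n := by
  induction n using Nat.strong_induction_on with
  | _ n ih =>
    rcases Nat.eq_zero_or_pos n with rfl | hpos
    · simp
    · rw [Nat.digits_def' (by norm_num) hpos, List.sum_cons]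
      have h1 : (Nat.digits 10 (n / 10)).sum ≤ n / 10 :=
        ih _ (Nat.div_lt_self hpos (by norm_num))
      omega

lemma pv_digits_sum_pos (n : Nat) (h : 0 < n) : 0 < (Nat.digits 10 n).sum := by
  induction n using Nat.strong_induction_on with
  | _ n ih =>
    rw [Nat.digits_def' (by norm_num) h, List.sum_cons]
    by_cases h10 : n / 10 = 0
    · omega
    · have := ih (n / 10) (Nat.div_lt_self h (by norm_num)) (Nat.pos_of_ne_zero h10)
      omega

lemma pv_digits_sum_lt (n : Nat) (h : 10 ≤ n) : (Nat.digits 10 n).sum < n := by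
  rw [Nat.digits_def' (by norm_num) (by omega), List.sum_cons]
  have h1 : (Nat.digits 10 (n / 10)).sum ≤ n / 10 := pv_digits_sum_le _
  omega

lemma pvDigitSumA_bounds (n : Int) (h : 10 ≤ n) : 0 < pvDigitSumA n ∧ pvDigitSumA n < n := by
  have hm : n = ((n.toNat : Nat) : Int) := by omega
  rw [hm, pvDigitSumA_eq n.toNat (by omega)]
  have h1 := pv_digits_sum_pos n.toNat (by omega)
  have h2 := pv_digits_sum_lt n.toNat (by omega)
  omega

-- while total_value >= 10: total_value = sum(map(int, str(total_value)))
def pvRootLoopA (n : Int) : Int :=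
  if h : 10 ≤ n then pvRootLoopA (pvDigitSumA n) else n
termination_by n.toNat
decreasing_by
  have := pvDigitSumA_bounds n h
  omega

def calculate_string_value (input_string : String) : Int × (List (String × Int)) :=
  let letter_values := pvLetterValues
  let s1 := PySem.Str.replace input_string " " ""
  let s2 := PySem.Str.lower s1
  let total_value := (s2.toList.map (fun c => letter_values.getD c 0)).sum
  let total_value2 := pvRootLoopA total_value
  let char_values := s2.toList.foldl
    (fun d c => d.insert (String.ofList [c]) (letter_values.getD c 0))
    (PySem.Dict.empty : PySem.Dict String Int)
  (total_value2, char_values.items)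

-- ===== PORT B =====
-- v = ord(ch) - 96 if 'a' <= ch <= 'z' else 0
def pvLetterValB (c : Char) : Int := if 'a' ≤ c ∧ c ≤ 'z' then (c.toNat : Int) - 96 else 0

def calculate_string_value_alt (input_string : String) : Int × (List (String × Int)) :=
  let s := PySem.Str.lower (PySem.Str.replace input_string " " "")
  let r := s.toList.foldl
    (fun acc c => (acc.1 + pvLetterValB c, acc.2.insert (String.ofList [c]) (pvLetterValB c)))
    ((0 : Int), (PySem.Dict.empty : PySem.Dict String Int))
  let total := if r.1 = 0 then 0 else PySem.Int.mod (r.1 - 1) 9 + 1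
  (total, r.2.items)

-- ===== PRECONDITION & SPEC =====
def Spec_calculate_string_value (input_string : String) (out : Int × (List (String × Int))) : Prop := out = calculate_string_value_alt input_string
instance (input_string : String) (out : Int × (List (String × Int))) : Decidable (Spec_calculate_string_value input_string out) := by unfold Spec_calculate_string_value; infer_instance

-- ===== CLAIM (what is proved, stated in full; the proofs are below) =====
def Claim_equal_calculate_string_value : Prop := ∀ (input_string : String), Dom_calculate_string_value input_string → Spec_calculate_string_value input_string (calculate_string_value input_string)

-- ===== LEMMAS AND PROOFS =====

-- the two per-character letter values agree on every Char
lemma pv_getD_letter (c : Char) : pvLetterValues.getD c 0 = pvLetterValB c := by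
  unfold pvLetterValB
  by_cases h : 'a' ≤ c ∧ c ≤ 'z'
  · obtain ⟨n, rfl, h1, h2⟩ : ∃ n, c = Char.ofNat n ∧ 97 ≤ n ∧ n ≤ 122 :=
      ⟨c.toNat, (Char.ofNat_toNat c).symm, by
        simpa [Char.le_def, UInt32.le_iff_toNat_le] using h.1, by
        simpa [Char.le_def, UInt32.le_iff_toNat_le] using h.2⟩
    interval_cases n <;> decide
  · rw [if_neg h, PySem.Dict.getD_of_not_contains]
    rw [PySem.Dict.contains_eq_decide_mem_keys]
    simp only [decide_eq_false_iff_not]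
    intro hm
    apply h
    fin_cases hm <;> decide

lemma pv_letterValB_nonneg (c : Char) : 0 ≤ pvLetterValB c := by
  unfold pvLetterValB
  split_ifs with h
  · have : 97 ≤ c.toNat := by simpa [Char.le_def, UInt32.le_iff_toNat_le] using h.1
    omega
  · exact le_refl _

-- A's while-loop computes the closed-form digital root
lemma pvRootLoopA_closed : ∀ (m : Nat) (n : Int), 0 ≤ n → n.toNat = m →
    pvRootLoopA n = if n = 0 then 0 else PySem.Int.mod (n - 1) 9 + 1 := by
  intro m
  induction m using Nat.strong_induction_on with
  | _ m ih =>
    intro n hn hm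
    rw [pvRootLoopA]
    by_cases h10 : 10 ≤ n
    · rw [dif_pos h10]
      obtain ⟨hpos, hlt⟩ := pvDigitSumA_bounds n h10
      rw [ih (pvDigitSumA n).toNat (by omega) _ (by omega) rfl]
      rw [if_neg (by omega), if_neg (by omega)]
      -- congruence mod 9: pvDigitSumA n ≡ n
      have hcast : n = ((n.toNat : Nat) : Int) := by omega
      have hds : pvDigitSumA n = ((Nat.digits 10 n.toNat).sum : Int) := by
        rw [hcast]; exact pvDigitSumA_eq n.toNat (by omega)
      have hmod9 := Nat.modEq_nine_digits_sum n.toNat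
      unfold Nat.ModEq at hmod9
      have hmod9' : ((n.toNat : Nat) : Int) % 9 = ((Nat.digits 10 n.toNat).sum : Int) % 9 := by
        exact_mod_cast hmod9
      rw [PySem.Int.mod_eq_emod_of_pos (by norm_num), PySem.Int.mod_eq_emod_of_pos (by norm_num)]
      omega
    · rw [dif_neg h10]
      by_cases h0 : n = 0
      · rw [if_pos h0, h0]
      · rw [if_neg h0, PySem.Int.mod_eq_emod_of_pos (by norm_num)]
        omega

theorem pv_main (input_string : String) :
    calculate_string_value input_string = calculate_string_value_alt input_string := by
  unfold calculate_string_value calculate_string_value_alt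
  simp only [pv_getD_letter]
  rw [PySem.List.foldl_prod_mk
    (f := fun (t : Int) (c : Char) => t + pvLetterValB c)
    (g := fun (d : PySem.Dict String Int) (c : Char) => d.insert (String.ofList [c]) (pvLetterValB c))]
  rw [PySem.List.foldl_add (g := pvLetterValB)]
  have hsum0 : 0 ≤ ((PySem.Str.lower (PySem.Str.replace input_string " " "")).toList.map pvLetterValB).sum :=
    List.sum_nonneg (by
      intro x hx
      obtain ⟨c, _, rfl⟩ := List.mem_map.mp hx
      exact pv_letterValB_nonneg c)
  rw [pvRootLoopA_closed _ _ hsum0 rfl]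
  simp

-- ===== VERDICT (by name: the statement is the Claim_ definition above) =====
theorem calculate_string_value_spec : Claim_equal_calculate_string_value := by
  intro s _
  unfold Spec_calculate_string_value
  exact pv_main s
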